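-- pv_equiv track=rewrite | github.com/Femn0X/Python_stuff- | extend.py | subfac
-- ===== SOURCE A (Python) =====
-- def subfac(n):
--     i=1
--     re=0 if n>0 else 1
--     while n:
--         re+=i
--         i+=1
--         n-=1
--     return re
-- ===== SOURCE B (Python) =====
-- def subfac(n):
--     return n * (n + 1) // 2 if n > 0 else 1
-- ===== Notes on version B (the rewrite author's own statement) =====
-- stated objective: faster
-- what changed: Replaced the counting loop with the closed-form triangular-number formula n*(n+1)//2 (keeping A's value 1 for n = 0).
-- outside the precondition, e.g. on subfac(-1): A does not finish within the time limit, B returns 1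
import Mathlib
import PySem

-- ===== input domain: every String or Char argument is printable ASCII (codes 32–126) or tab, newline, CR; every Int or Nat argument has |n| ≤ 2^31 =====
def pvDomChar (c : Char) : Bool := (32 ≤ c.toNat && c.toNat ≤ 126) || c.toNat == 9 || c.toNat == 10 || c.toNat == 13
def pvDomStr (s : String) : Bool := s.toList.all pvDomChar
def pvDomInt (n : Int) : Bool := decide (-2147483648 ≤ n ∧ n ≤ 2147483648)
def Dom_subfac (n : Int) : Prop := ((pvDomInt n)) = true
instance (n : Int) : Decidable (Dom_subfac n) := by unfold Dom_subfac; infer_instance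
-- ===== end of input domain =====

-- B replaces A's O(n) summing loop by the closed form n*(n+1)//2 (objective: faster, asymptotic).

-- ===== PORT A =====
-- the while loop, counting n down to 0; fuel = number of iterations (n.toNat)
def subfacLoop : Nat → Int → Int → Int
  | 0, _, re => re
  | k+1, i, re => subfacLoop k (i + 1) (re + i)

def subfac (n : Int) : Int :=
  subfacLoop n.toNat 1 (if n > 0 then 0 else 1)

-- ===== PORT B =====
def subfac_alt (n : Int) : Int :=
  if n > 0 then PySem.Int.floordiv (n * (n + 1)) 2 else 1

-- ===== PRECONDITION & SPEC =====
-- Pre_ excludes n < 0, where Python A's while loop never terminates (n never reaches 0).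
def Pre_subfac (n : Int) : Prop := 0 ≤ n
instance (n : Int) : Decidable (Pre_subfac n) := by unfold Pre_subfac; infer_instance
def pvWitness_subfac : Int := 5
def Spec_subfac (n : Int) (out : Int) : Prop := out = subfac_alt n
instance (n : Int) (out : Int) : Decidable (Spec_subfac n out) := by unfold Spec_subfac; infer_instance

-- ===== CLAIM (what is proved, stated in full; the proofs are below) =====
def Claim_equal_subfac : Prop := ∀ (n : Int), Dom_subfac n → Pre_subfac n → Spec_subfac n (subfac n)

-- ===== LEMMAS AND PROOFS =====
theorem subfacLoop_eq (k : Nat) : ∀ (i re : Int),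
    2 * subfacLoop k i re = 2 * re + (k : Int) * (2 * i + (k : Int) - 1) := by
  induction k with
  | zero => intro i re; simp [subfacLoop]
  | succ m ih =>
      intro i re
      rw [subfacLoop, ih]
      push_cast
      ring

-- ===== VERDICT (by name: the statement is the Claim_ definition above) =====
theorem subfac_spec : Claim_equal_subfac := by
  intro n _ hpre
  unfold Spec_subfac subfac subfac_alt
  by_cases h : n > 0
  · simp only [h, if_pos]
    have h2 := subfacLoop_eq n.toNat 1 0
    have hn : (n.toNat : Int) = n := Int.toNat_of_nonneg hpre
    rw [hn] at h2
    symm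
    rw [PySem.Int.floordiv_eq_iff_of_pos (by omega)]
    constructor <;> nlinarith [h2]
  · have hn0 : n = 0 := le_antisymm (not_lt.mp h) hpre
    subst hn0
    simp [subfacLoop]
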